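-- pv_equiv track=rewrite | github.com/Harshadshinde7620/QA-Agents | TestCaseGenerator_Agent/utils/qa_intelligence.py | assign_priority_and_type
-- ===== SOURCE A (Python) =====
-- def assign_priority_and_type(test_case):
--     scenario = test_case[1].lower()
--
--     priority = "Medium"
--     test_type = "Functional"
--
--     if any(word in scenario for word in ["error", "invalid", "fail"]):
--         test_type = "Negative"
--         priority = "High"
--
--     elif any(word in scenario for word in ["boundary", "limit", "max", "min"]):
--         test_type = "Edge"
--
--     elif any(word in scenario for word in ["security", "xss", "sql"]):
--         test_type = "Security"
--         priority = "High"
--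
--     return priority, test_type
-- ===== SOURCE B (Python) =====
-- KEYWORD_CATEGORY = {
--     "error": 0, "invalid": 0, "fail": 0,
--     "boundary": 1, "limit": 1, "max": 1, "min": 1,
--     "security": 2, "xss": 2, "sql": 2,
-- }
--
-- OUTCOMES = [
--     ("High", "Negative"),
--     ("Medium", "Edge"),
--     ("High", "Security"),
--     ("Medium", "Functional"),
-- ]
--
-- def assign_priority_and_type(test_case):
--     scenario = test_case[1].lower()
--     best = min((cat for word, cat in KEYWORD_CATEGORY.items() if word in scenario),
--                default=3)
--     return OUTCOMES[best]
-- ===== Notes on version B (the rewrite author's own statement) =====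
-- stated objective: alternative
-- what changed: Instead of an ordered if/elif chain short-circuiting at the first matching keyword group, B maps every keyword to a category index, scans ALL keywords taking the minimum matched category, and indexes a fixed outcome table (equal because the minimum matched category is exactly the first branch that would fire).
import Mathlib
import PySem

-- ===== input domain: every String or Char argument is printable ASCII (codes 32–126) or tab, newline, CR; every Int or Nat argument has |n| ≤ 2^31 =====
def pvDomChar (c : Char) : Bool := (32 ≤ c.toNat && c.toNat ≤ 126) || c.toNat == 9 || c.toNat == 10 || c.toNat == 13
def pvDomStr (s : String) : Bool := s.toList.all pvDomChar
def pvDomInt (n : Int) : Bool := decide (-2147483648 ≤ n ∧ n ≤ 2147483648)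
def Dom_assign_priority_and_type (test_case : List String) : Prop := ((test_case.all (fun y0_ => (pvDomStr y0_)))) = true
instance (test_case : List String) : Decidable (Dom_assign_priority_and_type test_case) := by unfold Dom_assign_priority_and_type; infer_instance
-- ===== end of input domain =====

-- B replaces A's if/elif first-match chain by a keyword→category map scanned exhaustively with a running minimum
-- category, then indexes an outcome table (alternative algorithm, same cost). Pre_ excludes lists of length < 2,
-- on which A raises IndexError.


-- ===== PORT A =====
def assign_priority_and_type (test_case : List String) : String × String :=
  let scenario := PySem.Str.lower ((PySem.List.pyGet? test_case 1).getD "")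
  let priority := "Medium"
  let test_type := "Functional"
  if ["error", "invalid", "fail"].any (fun word => PySem.Str.isIn word scenario) then
    ("High", "Negative")
  else if ["boundary", "limit", "max", "min"].any (fun word => PySem.Str.isIn word scenario) then
    (priority, "Edge")
  else if ["security", "xss", "sql"].any (fun word => PySem.Str.isIn word scenario) then
    ("High", "Security")
  else
    (priority, test_type)

-- ===== PORT B =====
def pvKeywordCategory : List (String × Nat) :=
  [("error", 0), ("invalid", 0), ("fail", 0),
   ("boundary", 1), ("limit", 1), ("max", 1), ("min", 1),
   ("security", 2), ("xss", 2), ("sql", 2)]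

def pvOutcomes : List (String × String) :=
  [("High", "Negative"), ("Medium", "Edge"), ("High", "Security"), ("Medium", "Functional")]

-- min over the matched categories with default 3, ported as a running-minimum fold; best ≤ 3 < 4, so the
-- Python indexing OUTCOMES[best] never raises and is ported as getD with an unreachable default.
def assign_priority_and_type_alt (test_case : List String) : String × String :=
  let scenario := PySem.Str.lower ((PySem.List.pyGet? test_case 1).getD "")
  let best := pvKeywordCategory.foldl
    (fun acc p => if PySem.Str.isIn p.1 scenario then Nat.min acc p.2 else acc) 3
  pvOutcomes.getD best ("Medium", "Functional")

-- ===== PRECONDITION & SPEC =====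
-- A indexes test_case[1]; Pre_ excludes lists of length < 2, where A raises IndexError.
def Pre_assign_priority_and_type (test_case : List String) : Prop := 2 ≤ test_case.length
instance (test_case : List String) : Decidable (Pre_assign_priority_and_type test_case) := by unfold Pre_assign_priority_and_type; infer_instance
def pvWitness_assign_priority_and_type : List String := ["TC1", "Invalid login fails"]

def Spec_assign_priority_and_type (test_case : List String) (out : String × String) : Prop := out = assign_priority_and_type_alt test_case
instance (test_case : List String) (out : String × String) : Decidable (Spec_assign_priority_and_type test_case out) := by unfold Spec_assign_priority_and_type; infer_instance

-- ===== CLAIM (what is proved, stated in full; the proofs are below) =====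
def Claim_equal_assign_priority_and_type : Prop := ∀ (test_case : List String), Dom_assign_priority_and_type test_case → Pre_assign_priority_and_type test_case → Spec_assign_priority_and_type test_case (assign_priority_and_type test_case)

-- ===== LEMMAS AND PROOFS =====

-- Folding the running minimum over one keyword group (all of category c) is: min with c iff any keyword matches.
lemma pv_fold_group (s : String) (c b : Nat) (ws : List String) :
    (ws.map (fun w => (w, c))).foldl
        (fun acc p => if PySem.Str.isIn p.1 s then Nat.min acc p.2 else acc) b
      = if ws.any (fun w => PySem.Str.isIn w s) then Nat.min b c else b := by
  induction ws generalizing b with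
  | nil => simp
  | cons w ws ih =>
    simp only [List.map_cons, List.foldl_cons, List.any_cons]
    rcases Bool.dichotomy (PySem.Str.isIn w s) with h | h
    · simp only [h, Bool.false_eq_true, Bool.false_or, if_false, ih]
    · simp only [h, Bool.true_or, if_true, ih]
      cases ws.any (fun w => PySem.Str.isIn w s) <;>
        simp only [Bool.false_eq_true, if_false, if_true, Nat.min_assoc, Nat.min_self]

-- ===== VERDICT (by name: the statement is the Claim_ definition above) =====
theorem assign_priority_and_type_spec : Claim_equal_assign_priority_and_type := by
  intro test_case _ _
  show assign_priority_and_type test_case = assign_priority_and_type_alt test_case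
  simp only [assign_priority_and_type, assign_priority_and_type_alt]
  set scen := PySem.Str.lower ((PySem.List.pyGet? test_case 1).getD "") with hscen
  have hsplit : pvKeywordCategory
      = (["error", "invalid", "fail"].map (fun w => (w, 0)))
        ++ (["boundary", "limit", "max", "min"].map (fun w => (w, 1)))
        ++ (["security", "xss", "sql"].map (fun w => (w, 2))) := rfl
  rw [hsplit]
  rw [List.foldl_append, List.foldl_append, pv_fold_group, pv_fold_group, pv_fold_group]
  cases h1 : (["error", "invalid", "fail"].any (fun word => PySem.Str.isIn word scen)) <;>
  cases h2 : (["boundary", "limit", "max", "min"].any (fun word => PySem.Str.isIn word scen)) <;>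
  cases h3 : (["security", "xss", "sql"].any (fun word => PySem.Str.isIn word scen)) <;>
  simp [pvOutcomes]
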